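-- pv_equiv track=rewrite | github.com/sajid-khan-afridi/hackathon1_repeat | backend/tests/benchmark/test_faithfulness.py | check_claim_support
-- ===== SOURCE A (Python) =====
-- from typing import List, Dict, Any, Tuple, Set
--
-- def normalize_text(text: str) -> str:
--     """
--     Normalize text for comparison by lowercasing and removing extra whitespace.
--
--     Args:
--         text: Text to normalize
--
--     Returns:
--         Normalized text
--     """
--     # Lowercase
--     text = text.lower()
--
--     # Remove extra whitespace
--     text = " ".join(text.split())
--
--     return text
--
-- def check_claim_support(claim: str, sources: List[Dict[str, Any]]) -> Tuple[bool, str]: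
--     """
--     Check if a factual claim is supported by the retrieved sources.
--
--     A claim is considered supported if:
--     1. Key terms from the claim appear in at least one source
--     2. The semantic meaning is consistent with source content
--
--     This is a heuristic approach. For production, consider using:
--     - Semantic similarity (embedding-based)
--     - NLI (Natural Language Inference) models
--     - LLM-based verification
--
--     Args:
--         claim: Factual claim to verify
--         sources: List of source documents
--
--     Returns:
--         Tuple of (is_supported, supporting_source_text)
--     """
--     normalized_claim = normalize_text(claim)
--
--     # Extract key terms from claim (words longer than 3 chars, excluding common words)
--     common_words = {
--         "the",
--         "and",
--         "for",
--         "are",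
--         "but",
--         "not",
--         "you",
--         "all",
--         "can",
--         "has",
--         "was",
--         "were",
--         "been",
--         "have",
--         "this",
--         "that",
--         "with",
--         "from",
--         "they",
--         "which",
--     }
--
--     claim_terms = set(
--         word for word in normalized_claim.split() if len(word) > 3 and word not in common_words
--     )
--
--     # Check each source for support
--     for source in sources:
--         source_text = normalize_text(source.get("text", ""))
--
--         # Count how many key terms appear in this source
--         matching_terms = sum(1 for term in claim_terms if term in source_text)
--
--         # If >50% of key terms are present, consider it supported
--         if len(claim_terms) > 0:
--             support_ratio = matching_terms / len(claim_terms)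
--             if support_ratio > 0.5:
--                 # Return the first matching source as evidence
--                 return (True, source.get("text", "")[:200])
--
--     # No source provides sufficient support
--     return (False, "")
-- ===== SOURCE B (Python) =====
-- from typing import List, Dict, Any, Tuple
--
--
-- def normalize_text(text: str) -> str:
--     return " ".join(text.lower().split())
--
--
-- _COMMON_WORDS = {
--     "the", "and", "for", "are", "but", "not", "you", "all", "can", "has",
--     "was", "were", "been", "have", "this", "that", "with", "from", "they",
--     "which",
-- }
--
--
-- def check_claim_support(claim: str, sources: List[Dict[str, Any]]) -> Tuple[bool, str]:
--     # Term-major strategy: deduplicate the key terms once, then for each term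
--     # sweep all (pre-normalized) source texts accumulating per-source match
--     # counts; finally scan the counts for the first sufficiently supported source.
--     terms = list(dict.fromkeys(
--         w for w in normalize_text(claim).split()
--         if len(w) > 3 and w not in _COMMON_WORDS
--     ))
--     n = len(terms)
--     raw = [s.get("text", "") for s in sources]
--     norm = [normalize_text(t) for t in raw]
--     counts = [0] * len(sources)
--     for term in terms:
--         counts = [c + 1 if term in t else c for c, t in zip(counts, norm)]
--     if n > 0:
--         for c, r in zip(counts, raw):
--             if 2 * c > n:
--                 return (True, r[:200])
--     return (False, "")
-- ===== Notes on version B (the rewrite author's own statement) =====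
-- stated objective: alternative
-- what changed: Source-major loop with per-source term counting and early return is replaced by a term-major pass: normalize all sources once, accumulate a per-source match-count vector one term at a time, then scan the vector for the first source with >50% matches (integer comparison 2*c>n instead of a float ratio).
import Mathlib
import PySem

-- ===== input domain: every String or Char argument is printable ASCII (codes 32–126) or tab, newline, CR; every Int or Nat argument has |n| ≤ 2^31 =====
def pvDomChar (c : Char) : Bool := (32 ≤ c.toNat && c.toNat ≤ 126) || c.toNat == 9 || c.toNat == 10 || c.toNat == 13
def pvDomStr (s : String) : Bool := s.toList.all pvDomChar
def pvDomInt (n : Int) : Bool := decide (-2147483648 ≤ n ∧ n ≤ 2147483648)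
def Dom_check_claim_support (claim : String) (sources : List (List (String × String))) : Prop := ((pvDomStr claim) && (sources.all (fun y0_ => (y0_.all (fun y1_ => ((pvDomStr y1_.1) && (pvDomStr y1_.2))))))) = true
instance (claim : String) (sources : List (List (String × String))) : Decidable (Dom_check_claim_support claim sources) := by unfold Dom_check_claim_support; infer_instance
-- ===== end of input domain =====

-- B re-implements A term-major (one normalization prepass, a per-source match-count
-- vector built term by term, then a scan for the first supported source) instead of
-- A's source-major loop; same return value everywhere, no speed claim.

-- ===== PORT A =====

-- shared helper: normalize_text(text) = " ".join(text.lower().split())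
def normalize_text (text : String) : String :=
  PySem.Str.join " " (PySem.Str.split₀ (PySem.Str.lower text))

def common_words : PySem.Set String :=
  PySem.Set.ofList ["the", "and", "for", "are", "but", "not", "you", "all", "can", "has",
    "was", "were", "been", "have", "this", "that", "with", "from", "they", "which"]

-- sum(1 for term in claim_terms if term in source_text)
def matchCount (terms : List String) (source_text : String) : Int :=
  (terms.map (fun term => if PySem.Str.isIn term source_text then (1 : Int) else 0)).sum

-- the 'for source in sources' loop; support_ratio = m/n > 0.5 is ported exactly as
-- the integer comparison 2*m > n (equivalent for the int operands Python divides here)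
def loopA (claim_terms : List String) : List (List (String × String)) → Bool × String
  | [] => (false, "")
  | source :: rest =>
    let source_text := normalize_text (PySem.Dict.getD (PySem.Dict.mk source) "text" "")
    let matching_terms := matchCount claim_terms source_text
    if 0 < claim_terms.length then
      if 2 * matching_terms > (claim_terms.length : Int) then
        (true, PySem.Str.slice (PySem.Dict.getD (PySem.Dict.mk source) "text" "") none (some 200))
      else loopA claim_terms rest
    else loopA claim_terms rest

def check_claim_support (claim : String) (sources : List (List (String × String))) : Bool × String :=
  let normalized_claim := normalize_text claim
  let claim_terms : PySem.Set String :=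
    PySem.Set.ofList ((PySem.Str.split₀ normalized_claim).filter
      (fun word => 3 < PySem.Str.len word && !(PySem.Set.contains common_words word)))
  loopA claim_terms sources

-- ===== PORT B =====

-- 'for term in terms: counts = [c+1 if term in t else c for c,t in zip(counts, norm)]'
def addTerm (counts : List Int) (norm : List String) (term : String) : List Int :=
  List.zipWith (fun c t => if PySem.Str.isIn term t then c + 1 else c) counts norm

-- 'for c, r in zip(counts, raw): if 2*c > n: return (True, r[:200])'
def scanB (n : Int) : List (Int × String) → Bool × String
  | [] => (false, "")
  | (c, r) :: rest =>
    if 2 * c > n then (true, PySem.Str.slice r none (some 200)) else scanB n rest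

def check_claim_support_alt (claim : String) (sources : List (List (String × String))) : Bool × String :=
  let terms := PySem.List.dedup ((PySem.Str.split₀ (normalize_text claim)).filter
      (fun w => 3 < PySem.Str.len w && !(PySem.Set.contains common_words w)))
  let n : Int := terms.length
  let raw := sources.map (fun s => PySem.Dict.getD (PySem.Dict.mk s) "text" "")
  let norm := raw.map normalize_text
  let counts := terms.foldl (fun cs term => addTerm cs norm term) (List.replicate sources.length 0)
  if 0 < n then scanB n (counts.zip raw) else (false, "")

-- ===== PRECONDITION & SPEC =====
def Spec_check_claim_support (claim : String) (sources : List (List (String × String))) (out : Bool × String) : Prop := out = check_claim_support_alt claim sources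
instance (claim : String) (sources : List (List (String × String))) (out : Bool × String) : Decidable (Spec_check_claim_support claim sources out) := by unfold Spec_check_claim_support; infer_instance

-- ===== CLAIM (what is proved, stated in full; the proofs are below) =====
def Claim_equal_check_claim_support : Prop := ∀ (claim : String) (sources : List (List (String × String))), Dom_check_claim_support claim sources → Spec_check_claim_support claim sources (check_claim_support claim sources)

-- ===== LEMMAS AND PROOFS =====

theorem zipWith_zipWith_right {α β γ δ : Type} (f : γ → β → δ) (g : α → β → γ)
    (as : List α) (bs : List β) :
    List.zipWith f (List.zipWith g as bs) bs = List.zipWith (fun a b => f (g a b) b) as bs := by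
  induction as generalizing bs with
  | nil => simp
  | cons a as ih => cases bs <;> simp [ih]

theorem zipWith_left {α β : Type} (as : List α) (bs : List β) (h : as.length = bs.length) :
    List.zipWith (fun a _ => a) as bs = as := by
  induction as generalizing bs with
  | nil => simp
  | cons a as ih =>
    cases bs with
    | nil => simp at h
    | cons b bs => simp_all

theorem matchCount_cons (t : String) (ts : List String) (s : String) :
    matchCount (t :: ts) s = (if PySem.Str.isIn t s then (1 : Int) else 0) + matchCount ts s := by
  simp [matchCount]

-- the term-major fold computes, at every position, the source-major match count
theorem foldl_addTerm (terms : List String) (norm : List String) (cs : List Int)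
    (h : cs.length = norm.length) :
    terms.foldl (fun cs' term => addTerm cs' norm term) cs
      = List.zipWith (fun c t => c + matchCount terms t) cs norm := by
  induction terms generalizing cs with
  | nil =>
    simp only [List.foldl_nil, matchCount, List.map_nil, List.sum_nil, add_zero]
    exact (zipWith_left cs norm h).symm
  | cons t ts ih =>
    rw [List.foldl_cons, ih _ (by simp [addTerm, h]), addTerm, zipWith_zipWith_right]
    have hf : (fun (c : Int) (b : String) =>
          (if PySem.Str.isIn t b then c + 1 else c) + matchCount ts b)
        = fun c b => c + matchCount (t :: ts) b := by
      funext c b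
      rw [matchCount_cons]
      split <;> ring
    rw [hf]

theorem scanB_eq_loopA (terms : List String) (hn : 0 < terms.length)
    (sources : List (List (String × String))) :
    scanB (terms.length : Int)
        (((sources.map (fun s => PySem.Dict.getD (PySem.Dict.mk s) "text" "")).map
            (fun t => matchCount terms (normalize_text t))).zip
          (sources.map (fun s => PySem.Dict.getD (PySem.Dict.mk s) "text" "")))
      = loopA terms sources := by
  induction sources with
  | nil => simp [scanB, loopA]
  | cons s rest ih =>
    simp only [List.map_map] at ih
    simp only [List.map_cons, List.map_map, List.zip_cons_cons, scanB, loopA, hn, if_true]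
    split <;> simp [ih]

theorem loopA_of_no_terms (sources : List (List (String × String))) :
    loopA [] sources = (false, "") := by
  induction sources with
  | nil => rfl
  | cons s rest ih => simpa [loopA] using ih

set_option maxHeartbeats 1000000 in
theorem check_claim_support_eq (claim : String) (sources : List (List (String × String))) :
    check_claim_support claim sources = check_claim_support_alt claim sources := by
  simp only [check_claim_support, check_claim_support_alt, PySem.List.dedup_eq_ofList]
  generalize PySem.Set.ofList ((PySem.Str.split₀ (normalize_text claim)).filter
      (fun w => 3 < PySem.Str.len w && !(PySem.Set.contains common_words w))) = terms
  rw [foldl_addTerm _ _ _ (by simp)]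
  have hzip : List.zipWith (fun c t => c + matchCount terms t)
      (List.replicate sources.length 0)
      ((sources.map (fun s => PySem.Dict.getD (PySem.Dict.mk s) "text" "")).map normalize_text)
      = (sources.map (fun s => PySem.Dict.getD (PySem.Dict.mk s) "text" "")).map
          (fun t => matchCount terms (normalize_text t)) := by
    induction sources with
    | nil => rfl
    | cons s rest ih =>
      simp only [List.map_cons, List.length_cons, List.replicate_succ,
        List.zipWith_cons_cons, zero_add]
      rw [ih]
  rw [hzip]
  by_cases h : 0 < terms.length
  · rw [if_pos (by exact_mod_cast h), scanB_eq_loopA terms h sources]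
  · have hnil : terms = [] := List.eq_nil_of_length_eq_zero (by omega)
    rw [if_neg (by exact_mod_cast h), hnil, loopA_of_no_terms]

-- ===== VERDICT (by name: the statement is the Claim_ definition above) =====
theorem check_claim_support_spec : Claim_equal_check_claim_support := by
  intro claim sources _
  unfold Spec_check_claim_support
  exact check_claim_support_eq claim sources
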